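-- pv_equiv track=rewrite | github.com/limar63/study_folder | PythonPrograms/OtherPythonGarbo/exam.py | breakups
-- ===== SOURCE A (Python) =====
-- def breakups(s):
--     if len(s) <=1:
--         return [[s]]
--
--     first = s[0]
--     other = breakups(s[1:])
--     lst = [[first] + i for i in other]
--     lst_1 = [[first + i[0]] + i[1:] for i in other]
--     return lst + lst_1
-- ===== SOURCE B (Python) =====
-- def breakups(s):
--     if len(s) <= 1:
--         return [[s]]
--     n = len(s)
--     out = []
--     for mask in range(2 ** (n - 1) - 1, -1, -1):
--         segs = []
--         cur = s[0]
--         for j in range(1, n):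
--             if (mask >> (n - 1 - j)) & 1:
--                 segs.append(cur)
--                 cur = s[j]
--             else:
--                 cur += s[j]
--         segs.append(cur)
--         out.append(segs)
--     return out
-- ===== Notes on version B (the rewrite author's own statement) =====
-- stated objective: alternative
-- what changed: Replaces A's recursion on suffixes (doubling the result with two list comprehensions per character) by a single non-recursive loop over bitmasks 2^(n-1)-1..0, decoding each mask's bits as cut positions into one composition.
import Mathlib
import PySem

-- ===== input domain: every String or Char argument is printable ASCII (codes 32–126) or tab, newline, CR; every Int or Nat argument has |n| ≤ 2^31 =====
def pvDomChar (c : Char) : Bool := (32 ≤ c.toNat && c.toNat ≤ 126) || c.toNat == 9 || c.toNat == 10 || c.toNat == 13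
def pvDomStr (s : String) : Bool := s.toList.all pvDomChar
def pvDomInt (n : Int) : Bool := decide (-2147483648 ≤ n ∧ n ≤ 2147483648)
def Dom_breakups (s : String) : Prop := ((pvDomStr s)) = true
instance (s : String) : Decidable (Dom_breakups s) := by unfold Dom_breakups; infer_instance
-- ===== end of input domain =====

-- B replaces A's exponential recursion by a single loop over bitmasks (each mask encodes the cut
-- positions), producing the same list of compositions in the same order; objective: alternative.

-- ===== PORT A =====
-- A works on Python strings; we transliterate on List Char (strings as char lists, String.mk at the
-- boundary): s[0] → head, s[1:] → tail, string + → list ++, i[0]/i[1:] → headD []/drop 1 (exact here: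
-- every element of the recursive result is a nonempty list, and the guard len(s) ≤ 1 covers []/[c]).
def breakupsCore : List Char → List (List (List Char))
  | [] => [[[]]]                                  -- len(s) <= 1: return [[s]]
  | [c] => [[[c]]]
  | c :: rest =>                                  -- rest = s[1:], [c] = first
      let other := breakupsCore rest
      let lst := other.map (fun i => [c] :: i)
      let lst1 := other.map (fun i => ([c] ++ i.headD []) :: i.drop 1)
      lst ++ lst1

def breakups (s : String) : List (List String) :=
  (breakupsCore s.toList).map (List.map String.mk)

-- ===== PORT B =====
-- inner loop 'for j in range(1, n)' over the remaining characters; the bit tested at step j is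
-- n-1-j, which equals the length of the not-yet-scanned suffix rs (invariant n = j + rest.length).
def bSegs (mask n j : Nat) (cur : List Char) (rest : List Char) (segs : List (List Char)) :
    List (List Char) :=
  match rest with
  | [] => segs ++ [cur]                           -- segs.append(cur) after the loop
  | ch :: rs =>
      if (mask >>> (n - 1 - j)) % 2 = 1 then
        bSegs mask n (j + 1) [ch] rs (segs ++ [cur])
      else
        bSegs mask n (j + 1) (cur ++ [ch]) rs segs

def bCore (cs : List Char) : List (List (List Char)) :=
  if cs.length ≤ 1 then [[cs]]
  else
    match cs with
    | [] => [[[]]]                                -- unreachable (length ≥ 2)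
    | c :: rest =>
        let n := cs.length
        ((List.range (2 ^ (n - 1))).reverse).map (fun mask => bSegs mask n 1 [c] rest [])

def breakups_alt (s : String) : List (List String) :=
  (bCore s.toList).map (List.map String.mk)

-- ===== PRECONDITION & SPEC =====
def Spec_breakups (s : String) (out : List (List String)) : Prop := out = breakups_alt s
instance (s : String) (out : List (List String)) : Decidable (Spec_breakups s out) := by unfold Spec_breakups; infer_instance

-- ===== CLAIM (what is proved, stated in full; the proofs are below) =====
def Claim_equal_breakups : Prop := ∀ (s : String), Dom_breakups s → Spec_breakups s (breakups s)

-- ===== LEMMAS AND PROOFS =====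

-- bSegs with the invariant n = j + rest.length tests bit rest.length - 1; segRun is that view.
def segRun (mask : Nat) (cur : List Char) (rest : List Char) (segs : List (List Char)) :
    List (List Char) :=
  match rest with
  | [] => segs ++ [cur]
  | ch :: rs =>
      if (mask >>> rs.length) % 2 = 1 then segRun mask [ch] rs (segs ++ [cur])
      else segRun mask (cur ++ [ch]) rs segs

theorem bSegs_eq_segRun (rest : List Char) (mask n j : Nat) (cur : List Char)
    (segs : List (List Char)) (h : n = j + rest.length) :
    bSegs mask n j cur rest segs = segRun mask cur rest segs := by
  induction rest generalizing j cur segs with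
  | nil => rfl
  | cons ch rs ih =>
      simp only [bSegs, segRun]
      have hb : n - 1 - j = rs.length := by simp only [List.length_cons] at h; omega
      rw [hb]
      split_ifs with hbit
      · exact ih (j + 1) [ch] (segs ++ [cur]) (by simp only [List.length_cons] at h ⊢; omega)
      · exact ih (j + 1) (cur ++ [ch]) segs (by simp only [List.length_cons] at h ⊢; omega)

theorem segRun_acc (rest : List Char) (mask : Nat) (cur : List Char)
    (segs : List (List Char)) : segRun mask cur rest segs = segs ++ segRun mask cur rest [] := by
  induction rest generalizing cur segs with
  | nil => simp [segRun]
  | cons ch rs ih =>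
      simp only [segRun, List.nil_append]
      split_ifs with hbit
      · rw [ih [ch] (segs ++ [cur]), ih [ch] [cur]]; simp
      · exact ih (cur ++ [ch]) segs

-- segRun ignores bits of the mask at or above the length of rest.
theorem segRun_high_irrel (rest : List Char) (mask t L : Nat) (hL : rest.length ≤ L)
    (cur : List Char) (segs : List (List Char)) :
    segRun (mask + 2 ^ L * t) cur rest segs = segRun mask cur rest segs := by
  induction rest generalizing cur segs with
  | nil => rfl
  | cons ch rs ih =>
      have hlt : rs.length < L := by simp [List.length_cons] at hL; omega
      have hbit : ((mask + 2 ^ L * t) >>> rs.length) % 2 = (mask >>> rs.length) % 2 := by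
        have hdec : 2 ^ L * t = 2 ^ rs.length * (2 ^ (L - rs.length) * t) := by
          rw [← mul_assoc, ← pow_add]; congr 2; omega
        rw [Nat.shiftRight_eq_div_pow, Nat.shiftRight_eq_div_pow, hdec,
          Nat.add_mul_div_left _ _ (Nat.two_pow_pos rs.length)]
        have h2 : (2 : Nat) ∣ 2 ^ (L - rs.length) * t :=
          Dvd.dvd.mul_right (dvd_pow_self 2 (by omega)) t
        omega
      have hrs : rs.length ≤ L := by omega
      simp only [segRun, hbit]
      split_ifs with hb
      · exact ih hrs [ch] (segs ++ [cur])
      · exact ih hrs (cur ++ [ch]) segs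

-- cur is a prefix of the first produced segment; the rest of the output does not depend on cur.
theorem segRun_cur (rest : List Char) (mask : Nat) (cur : List Char) :
    segRun mask cur rest [] =
      (cur ++ (segRun mask [] rest []).headD []) :: (segRun mask [] rest []).drop 1 := by
  induction rest generalizing cur with
  | nil => simp [segRun]
  | cons ch rs ih =>
      simp only [segRun, List.nil_append]
      split_ifs with hbit
      · rw [segRun_acc rs mask [ch] [cur], segRun_acc rs mask [ch] [[]]]
        simp
      · rw [ih (cur ++ [ch]), ih [ch]]
        simp

theorem aCore_eq_mapform (c : Char) (rest : List Char) (h : breakupsCore rest = bCore rest) :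
    breakupsCore (c :: rest) =
      ((List.range (2 ^ rest.length)).reverse).map (fun m => segRun m [c] rest []) := by
  cases rest with
  | nil => simp [breakupsCore, segRun]
  | cons c' rest' =>
      -- abbreviations
      set L : Nat := rest'.length + 1 with hL
      have hrange : (List.range (2 ^ L)).reverse =
          ((List.range (2 ^ (L - 1))).reverse.map (fun m => 2 ^ (L - 1) + m)) ++
            (List.range (2 ^ (L - 1))).reverse := by
        have h2 : 2 ^ L = 2 ^ (L - 1) + 2 ^ (L - 1) := by
          have hLs : L - 1 + 1 = L := by omega
          conv_lhs => rw [← hLs]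
          rw [pow_succ]; ring
        rw [h2, List.range_add, List.reverse_append, ← List.map_reverse]
      have hbc : bCore (c' :: rest') =
          ((List.range (2 ^ (L - 1))).reverse).map (fun m => segRun m [c'] rest' []) := by
        cases rest' with
        | nil => simp [bCore, segRun, hL]
        | cons d ds =>
            simp only [bCore, List.length_cons, hL]
            rw [if_neg (by simp)]
            refine List.map_congr_left (fun m hm => ?_)
            exact bSegs_eq_segRun (d :: ds) m _ 1 [c'] [] (by simp only [List.length_cons]; omega)
      have hother := h.trans hbc
      simp only [breakupsCore, hother, List.length_cons, ← hL]
      rw [hrange, List.map_append]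
      congr 1
      · -- high half: masks 2^(L-1)+m, first character cut off
        simp only [List.map_map]
        refine List.map_congr_left (fun m hm => ?_)
        have hmlt : m < 2 ^ (L - 1) := by
          rw [List.mem_reverse, List.mem_range] at hm; exact hm
        show [c] :: segRun m [c'] rest' [] =
          segRun (2 ^ (L - 1) + m) [c] (c' :: rest') []
        have hbit1 : ((2 ^ (L - 1) + m) >>> rest'.length) % 2 = 1 := by
          have hre : rest'.length = L - 1 := by omega
          rw [hre, Nat.shiftRight_eq_div_pow, Nat.add_div_of_dvd_right (dvd_refl _),
            Nat.div_eq_of_lt hmlt, Nat.div_self (Nat.two_pow_pos (L - 1))]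
        have hdrop : segRun (2 ^ (L - 1) + m) [c'] rest' [] = segRun m [c'] rest' [] := by
          have := segRun_high_irrel rest' m 1 (L - 1) (by omega) [c'] []
          simpa [Nat.add_comm] using this
        simp only [segRun]
        rw [if_pos hbit1, segRun_acc rest' (2 ^ (L - 1) + m) [c'] ([] ++ [[c]]), hdrop]
        simp
      · -- low half: masks m < 2^(L-1), first two characters glued
        simp only [List.map_map]
        refine List.map_congr_left (fun m hm => ?_)
        have hmlt : m < 2 ^ (L - 1) := by
          rw [List.mem_reverse, List.mem_range] at hm; exact hm
        show ([c] ++ (segRun m [c'] rest' []).headD []) :: (segRun m [c'] rest' []).drop 1 =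
          segRun m [c] (c' :: rest') []
        have hbit0 : (m >>> rest'.length) % 2 = 0 := by
          have hre : rest'.length = L - 1 := by omega
          rw [hre, Nat.shiftRight_eq_div_pow, Nat.div_eq_of_lt hmlt]
        simp only [segRun, hbit0]
        rw [if_neg (by omega)]
        rw [segRun_cur rest' m ([c] ++ [c']), segRun_cur rest' m [c']]
        simp

theorem aCore_eq_bCore (cs : List Char) : breakupsCore cs = bCore cs := by
  induction cs with
  | nil => rfl
  | cons c rest ih =>
      cases rest with
      | nil => rfl
      | cons c' rest' =>
          rw [aCore_eq_mapform c (c' :: rest') ih]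
          simp only [bCore, List.length_cons]
          rw [if_neg (by simp)]
          refine (List.map_congr_left (fun m hm => ?_)).symm
          exact bSegs_eq_segRun (c' :: rest') m _ 1 [c] [] (by simp only [List.length_cons]; omega)

-- ===== VERDICT (by name: the statement is the Claim_ definition above) =====
theorem breakups_spec : Claim_equal_breakups := by
  intro s _
  unfold Spec_breakups breakups breakups_alt
  rw [aCore_eq_bCore]
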